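-- pv_equiv track=rewrite | github.com/intel/cluster-management-toolkit | clustermanagementtoolkit/networkio.py | reformat_github_release_notes
-- ===== SOURCE A (Python) =====
-- def reformat_github_release_notes(changelog: str = "") -> str:
--     """
--     Given a release message from GitHub reformat it as (extremely) rudimentary Markdown.
--
--         Parameters:
--             changelog (str): The changelog to reformat
--         Returns:
--             (str): The reformatted changelog
--     """
--     formatted_changelog = []
--
--     previous_line = None
--     for line in changelog.splitlines():
--         if previous_line is None:
--             previous_line = line
--             continue
--         if line == "---":
--             formatted_changelog.append(f"## {previous_line}")
--             previous_line = None
--             continue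
--         formatted_changelog.append(previous_line)
--         previous_line = line
--
--     if previous_line is not None:
--         formatted_changelog.append(previous_line)
--
--     return "\n".join(formatted_changelog)
-- ===== SOURCE B (Python) =====
-- def reformat_github_release_notes(changelog: str = "") -> str:
--     """
--     Given a release message from GitHub reformat it as (extremely) rudimentary Markdown.
--
--         Parameters:
--             changelog (str): The changelog to reformat
--         Returns:
--             (str): The reformatted changelog
--     """
--     lines = changelog.splitlines()
--     n = len(lines)
--     formatted = []
--     i = 0
--     while i < n:
--         if i + 1 < n and lines[i + 1] == "---":
--             formatted.append(f"## {lines[i]}")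
--             i += 2
--         else:
--             formatted.append(lines[i])
--             i += 1
--     return "\n".join(formatted)
-- ===== Notes on version B (the rewrite author's own statement) =====
-- stated objective: alternative
-- what changed: Replaces the delayed previous_line accumulator threaded through the for-loop with a while loop over an explicit index that looks ahead one line for the separator line and consumes two lines on a match.
import Mathlib
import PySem

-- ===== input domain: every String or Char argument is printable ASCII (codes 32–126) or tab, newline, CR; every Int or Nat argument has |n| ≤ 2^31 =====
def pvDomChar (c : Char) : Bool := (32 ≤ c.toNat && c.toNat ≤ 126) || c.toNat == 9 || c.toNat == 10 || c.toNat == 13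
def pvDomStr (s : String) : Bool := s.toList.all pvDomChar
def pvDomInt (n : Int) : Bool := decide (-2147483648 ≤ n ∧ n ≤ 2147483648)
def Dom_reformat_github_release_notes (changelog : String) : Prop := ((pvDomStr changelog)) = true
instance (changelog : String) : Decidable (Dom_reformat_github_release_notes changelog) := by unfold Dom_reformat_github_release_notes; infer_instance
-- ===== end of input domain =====

-- B replaces A's delayed previous_line accumulator with an index-based while loop
-- that looks one line ahead for the separator line (alternative decomposition, same cost).


-- ===== PORT A =====
-- one step of A's for-loop: state = (previous_line, formatted_changelog)
def rgrnStepA (st : Option String × List String) (line : String) : Option String × List String :=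
  match st with
  | (none, acc) => (some line, acc)
  | (some prev, acc) =>
    if line = "---" then (none, acc ++ ["## " ++ prev])
    else (some line, acc ++ [prev])

def reformat_github_release_notes (changelog : String) : String :=
  let st := (PySem.Str.splitlines changelog).foldl rgrnStepA (none, [])
  let formatted := match st.1 with
    | none => st.2
    | some prev => st.2 ++ [prev]
  PySem.Str.join "\n" formatted

-- ===== PORT B =====
-- B's while loop over index i (i only ever increases from 0, so it is a Nat here);
-- 'i + 1 < n and lines[i+1] == "---"' is the lookahead test.
def rgrnLoopB (lines : List String) (i : Nat) : List String :=
  if h : i < lines.length then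
    if h2 : i + 1 < lines.length then
      if lines[i + 1] = "---" then ("## " ++ lines[i]) :: rgrnLoopB lines (i + 2)
      else lines[i] :: rgrnLoopB lines (i + 1)
    else lines[i] :: rgrnLoopB lines (i + 1)
  else []
termination_by lines.length - i

def reformat_github_release_notes_alt (changelog : String) : String :=
  PySem.Str.join "\n" (rgrnLoopB (PySem.Str.splitlines changelog) 0)

-- ===== PRECONDITION & SPEC =====
def Spec_reformat_github_release_notes (changelog : String) (out : String) : Prop := out = reformat_github_release_notes_alt changelog
instance (changelog : String) (out : String) : Decidable (Spec_reformat_github_release_notes changelog out) := by unfold Spec_reformat_github_release_notes; infer_instance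

-- ===== CLAIM (what is proved, stated in full; the proofs are below) =====
def Claim_equal_reformat_github_release_notes : Prop := ∀ (changelog : String), Dom_reformat_github_release_notes changelog → Spec_reformat_github_release_notes changelog (reformat_github_release_notes changelog)

-- ===== LEMMAS AND PROOFS =====

-- the common clean recursion both loops compute
def rgrnPairs : List String → List String
  | [] => []
  | [x] => [x]
  | x :: y :: rest =>
    if y = "---" then ("## " ++ x) :: rgrnPairs rest
    else x :: rgrnPairs (y :: rest)

-- A's fold, finalized, equals acc ++ pairs of (prev? consed onto the remaining lines)
theorem rgrnLoopA_eq (ls : List String) : ∀ (prev : Option String) (acc : List String),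
    (let st := ls.foldl rgrnStepA (prev, acc)
     match st.1 with
     | none => st.2
     | some p => st.2 ++ [p])
    = acc ++ (match prev with | none => rgrnPairs ls | some p => rgrnPairs (p :: ls)) := by
  induction ls with
  | nil =>
    intro prev acc
    cases prev <;> simp [rgrnPairs]
  | cons l ls ih =>
    intro prev acc
    cases prev with
    | none =>
      simpa [List.foldl_cons, rgrnStepA] using ih (some l) acc
    | some p =>
      by_cases hl : l = "---"
      · subst hl
        simpa [List.foldl_cons, rgrnStepA, rgrnPairs] using ih none (acc ++ ["## " ++ p])
      · have := ih (some l) (acc ++ [p])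
        simp [List.foldl_cons, rgrnStepA, hl, rgrnPairs, this]

-- B's index loop equals the clean recursion on the suffix from i
theorem rgrnLoopB_eq (lines : List String) (i : Nat) :
    rgrnLoopB lines i = rgrnPairs (lines.drop i) := by
  induction i using rgrnLoopB.induct (lines := lines) with
  | case1 i h h2 hsep ih =>
    rw [rgrnLoopB]
    have hd : lines.drop i = lines[i] :: lines[i+1] :: lines.drop (i + 2) := by
      rw [List.drop_eq_getElem_cons h, List.drop_eq_getElem_cons h2]
    simp [h, h2, hsep, hd, rgrnPairs, ih]
  | case2 i h h2 hsep ih =>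
    have hd : lines.drop i = lines[i] :: lines.drop (i + 1) := List.drop_eq_getElem_cons h
    have hd2 : lines.drop (i + 1) = lines[i+1] :: lines.drop (i + 2) := List.drop_eq_getElem_cons h2
    have hr : rgrnPairs (lines.drop i) = lines[i] :: rgrnPairs (lines.drop (i + 1)) := by
      rw [hd, hd2]
      simp only [rgrnPairs, if_neg hsep]
    rw [rgrnLoopB]
    simp [h, h2, hsep, hr, ih]
  | case3 i h h2 ih =>
    rw [rgrnLoopB]
    have hlen : lines.length = i + 1 := by omega
    have hd : lines.drop i = lines[i] :: lines.drop (i + 1) := List.drop_eq_getElem_cons h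
    have hnil : lines.drop (i + 1) = [] := List.drop_eq_nil_of_le (by omega)
    simp [h, h2, hd, hnil, rgrnPairs, ih]
  | case4 i h =>
    rw [rgrnLoopB]
    have hnil : lines.drop i = [] := List.drop_eq_nil_of_le (by omega)
    simp [h, hnil, rgrnPairs]

-- ===== VERDICT (by name: the statement is the Claim_ definition above) =====
theorem reformat_github_release_notes_spec : Claim_equal_reformat_github_release_notes := by
  intro changelog _
  unfold Spec_reformat_github_release_notes reformat_github_release_notes reformat_github_release_notes_alt
  rw [rgrnLoopB_eq]
  simpa using congrArg (PySem.Str.join "\n") (rgrnLoopA_eq (PySem.Str.splitlines changelog) none [])
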